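-- pv_equiv track=rewrite | github.com/simoncblyth/env | pycuda/pycuda_pyopengl_interop/gpu/tools.py | chunk_iterator
-- ===== SOURCE A (Python) =====
-- def chunk_iterator(nelements, nthreads_per_block=64, max_blocks=1024):
--     """Iterator that yields tuples with the values requried to process
--     a long array in multiple kernel passes on the GPU.
--
--     Each yielded value is of the form,
--         (first_index, elements_this_iteration, nblocks_this_iteration)
--
--     Example:
--         >>> list(chunk_iterator(300, 32, 2))
--         [(0, 64, 2), (64, 64, 2), (128, 64, 2), (192, 64, 2), (256, 9, 1)]
--     """
--     first = 0
--     while first < nelements: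
--         elements_left = nelements - first
--         blocks = int(elements_left // nthreads_per_block)
--         if elements_left % nthreads_per_block != 0:
--             blocks += 1 # Round up only if needed
--         blocks = min(max_blocks, blocks)
--         elements_this_round = min(elements_left, blocks * nthreads_per_block)
--
--         yield (first, elements_this_round, blocks)
--         first += elements_this_round
-- ===== SOURCE B (Python) =====
-- def chunk_iterator(nelements, nthreads_per_block=64, max_blocks=1024):
--     """Same chunks as A: compute the bulk of full-size chunks in closed form,
--     then a single tail chunk with a ceil-divided block count."""
--     if nelements <= 0:
--         return
--     full_size = max_blocks * nthreads_per_block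
--     full_count = nelements // full_size
--     for first in range(0, full_count * full_size, full_size):
--         yield (first, full_size, max_blocks)
--     rem = nelements - full_count * full_size
--     if rem:
--         yield (full_count * full_size, rem,
--                rem // nthreads_per_block + (1 if rem % nthreads_per_block else 0))
-- ===== Notes on version B (the rewrite author's own statement) =====
-- stated objective: alternative
-- what changed: B computes the number of full-size chunks in closed form with one floor division, emits the identical interior chunks with a stride range, and special-cases the single tail chunk with a ceil division, instead of A's while loop that recomputes floor/mod/min per iteration.
-- outside the precondition, e.g. on chunk_iterator(10, -2, 4): A returns [(0, 10, -5)], B returns [(16, -6, 3)]; on chunk_iterator(10, 0, 4): A raises ZeroDivisionError, B raises ZeroDivisionError; on chunk_iterator(10, 2, 0): A does not finish within the time limit, B raises ZeroDivisionError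
import Mathlib
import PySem

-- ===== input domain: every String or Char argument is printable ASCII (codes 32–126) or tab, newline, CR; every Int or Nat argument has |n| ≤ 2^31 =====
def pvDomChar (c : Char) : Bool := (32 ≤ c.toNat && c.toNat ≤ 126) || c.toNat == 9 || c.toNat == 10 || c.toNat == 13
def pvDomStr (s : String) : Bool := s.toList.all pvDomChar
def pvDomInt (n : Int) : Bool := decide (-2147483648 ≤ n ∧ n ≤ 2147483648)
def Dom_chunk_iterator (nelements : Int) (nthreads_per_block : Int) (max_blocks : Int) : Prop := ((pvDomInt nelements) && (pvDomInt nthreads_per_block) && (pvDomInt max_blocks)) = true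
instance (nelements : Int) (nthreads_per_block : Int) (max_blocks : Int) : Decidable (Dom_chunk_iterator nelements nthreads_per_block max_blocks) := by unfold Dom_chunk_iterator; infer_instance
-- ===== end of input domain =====

-- B replaces A's per-iteration div/mod/min while-loop by a closed-form bulk (stride range of
-- identical full-size chunks) plus one ceil-divided tail chunk; alternative decomposition, same cost.


-- ===== PORT A =====
-- A's loop-body block computation: blocks = el // t, rounded up if needed, capped at max_blocks.
def chunkBlocks (elements_left : Int) (nthreads_per_block : Int) (max_blocks : Int) : Int :=
  let blocks := PySem.Int.floordiv elements_left nthreads_per_block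
  let blocks := if PySem.Int.mod elements_left nthreads_per_block ≠ 0 then blocks + 1 else blocks
  min max_blocks blocks

-- A's while loop as fuel recursion; inside Pre_ every iteration advances first by ≥ 1,
-- so nelements.toNat fuel (≥ number of emitted chunks) is exact.
def chunkLoopA : Int → Int → Int → Int → Nat → List (Int × Int × Int)
  | _, _, _, _, 0 => []
  | n, t, m, first, (fuel+1) =>
    if first < n then
      let elements_left := n - first
      let blocks := chunkBlocks elements_left t m
      let elements_this_round := min elements_left (blocks * t)
      (first, elements_this_round, blocks) :: chunkLoopA n t m (first + elements_this_round) fuel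
    else []

def chunk_iterator (nelements : Int) (nthreads_per_block : Int) (max_blocks : Int) : List (Int × Int × Int) :=
  chunkLoopA nelements nthreads_per_block max_blocks 0 nelements.toNat

-- ===== PORT B =====
def chunk_iterator_alt (nelements : Int) (nthreads_per_block : Int) (max_blocks : Int) : List (Int × Int × Int) :=
  if nelements ≤ 0 then []
  else
    let full_size := max_blocks * nthreads_per_block
    let full_count := PySem.Int.floordiv nelements full_size
    let bulk := (PySem.List.pyRange 0 (full_count * full_size) full_size).map
      (fun first => (first, full_size, max_blocks))
    let rem := nelements - full_count * full_size
    if rem ≠ 0 then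
      bulk ++ [(full_count * full_size, rem,
        PySem.Int.floordiv rem nthreads_per_block +
          (if PySem.Int.mod rem nthreads_per_block ≠ 0 then 1 else 0))]
    else bulk

-- ===== PRECONDITION & SPEC =====
-- Pre_ excludes nonpositive nthreads_per_block or max_blocks when nelements > 0: there A either
-- raises ZeroDivisionError, diverges, or (negative divisor) returns tuples with negative block
-- counts as an artefact of floor-division sign — outside the function's natural domain.
def Pre_chunk_iterator (nelements : Int) (nthreads_per_block : Int) (max_blocks : Int) : Prop :=
  nelements ≤ 0 ∨ (0 < nthreads_per_block ∧ 0 < max_blocks)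
instance (nelements : Int) (nthreads_per_block : Int) (max_blocks : Int) : Decidable (Pre_chunk_iterator nelements nthreads_per_block max_blocks) := by unfold Pre_chunk_iterator; infer_instance
def pvWitness_chunk_iterator : Int × Int × Int := (300, 32, 2)
def Spec_chunk_iterator (nelements : Int) (nthreads_per_block : Int) (max_blocks : Int) (out : List (Int × Int × Int)) : Prop := out = chunk_iterator_alt nelements nthreads_per_block max_blocks
instance (nelements : Int) (nthreads_per_block : Int) (max_blocks : Int) (out : List (Int × Int × Int)) : Decidable (Spec_chunk_iterator nelements nthreads_per_block max_blocks out) := by unfold Spec_chunk_iterator; infer_instance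

-- ===== CLAIM (what is proved, stated in full; the proofs are below) =====
def Claim_equal_chunk_iterator : Prop := ∀ (nelements : Int) (nthreads_per_block : Int) (max_blocks : Int), Dom_chunk_iterator nelements nthreads_per_block max_blocks → Pre_chunk_iterator nelements nthreads_per_block max_blocks → Spec_chunk_iterator nelements nthreads_per_block max_blocks (chunk_iterator nelements nthreads_per_block max_blocks)

-- ===== LEMMAS AND PROOFS =====

theorem mod_bounds (a t : Int) (ht : 0 < t) : 0 ≤ PySem.Int.mod a t ∧ PySem.Int.mod a t < t := by
  rw [PySem.Int.mod_eq_emod_of_pos ht]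
  exact ⟨Int.emod_nonneg a (by omega), Int.emod_lt_of_pos a ht⟩

-- Interior chunk: when at least one full chunk is left, A caps blocks at max_blocks.
theorem chunkBlocks_full (el t m : Int) (ht : 0 < t) (h : m * t ≤ el) :
    chunkBlocks el t m = m := by
  unfold chunkBlocks
  have hfd := PySem.Int.floordiv_mul_add_mod el t
  obtain ⟨h1, h2⟩ := mod_bounds el t ht
  have hge : m ≤ PySem.Int.floordiv el t := by nlinarith
  split
  · exact min_eq_left (by omega)
  · exact min_eq_left hge

-- Tail chunk: with less than a full chunk left, A's capped blocks equal B's ceil division.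
theorem chunkBlocks_tail (el t m : Int) (ht : 0 < t) (h : el < m * t) :
    chunkBlocks el t m =
      PySem.Int.floordiv el t + (if PySem.Int.mod el t ≠ 0 then 1 else 0) := by
  unfold chunkBlocks
  have hfd := PySem.Int.floordiv_mul_add_mod el t
  obtain ⟨h1, h2⟩ := mod_bounds el t ht
  have hlt : PySem.Int.floordiv el t < m := by nlinarith
  split
  · exact min_eq_right (by omega)
  · rw [add_zero]; exact min_eq_right (by omega)

theorem etr_tail (el t : Int) (ht : 0 < t) (h0 : 0 ≤ el) :
    min el ((PySem.Int.floordiv el t + (if PySem.Int.mod el t ≠ 0 then 1 else 0)) * t) = el := by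
  have hfd := PySem.Int.floordiv_mul_add_mod el t
  obtain ⟨h1, h2⟩ := mod_bounds el t ht
  apply min_eq_left
  by_cases hz : PySem.Int.mod el t = 0
  · rw [if_neg (by simp [hz])]
    nlinarith
  · rw [if_pos hz]
    nlinarith

-- Main loop characterisation: starting at 'first' with j full chunks and remainder r left,
-- A's loop emits j full-size chunks then (if r ≠ 0) the tail chunk.
theorem chunkLoopA_eq (t m : Int) (ht : 0 < t) (hm : 0 < m) :
    ∀ (j : Nat) (n first r : Int) (fuel : Nat),
      n - first = (j : Int) * (m * t) + r → 0 ≤ r → r < m * t →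
      (j + (if r = 0 then 0 else 1)) ≤ fuel →
      chunkLoopA n t m first fuel =
        (List.range j).map (fun (i : Nat) => (first + (i : Int) * (m * t), m * t, m)) ++
          (if r = 0 then ([] : List (Int × Int × Int)) else
            [(first + (j : Int) * (m * t), r,
              PySem.Int.floordiv r t + (if PySem.Int.mod r t ≠ 0 then 1 else 0))]) := by
  have hmt : 0 < m * t := mul_pos hm ht
  intro j
  induction j with
  | zero =>
    intro n first r fuel hnf hr0 hrlt hfuel
    have hnf' : n - first = r := by simpa using hnf
    rw [List.range_zero, List.map_nil, List.nil_append]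
    by_cases hr : r = 0
    · rw [if_pos hr]
      cases fuel with
      | zero => rfl
      | succ f => simp only [chunkLoopA]; rw [if_neg (by omega)]
    · rw [if_neg hr] at hfuel ⊢
      cases fuel with
      | zero => omega
      | succ f =>
        simp only [chunkLoopA]
        rw [if_pos (by omega)]
        rw [hnf', chunkBlocks_tail r t m ht hrlt, etr_tail r t ht hr0]
        congr 1
        · congr 1
          push_cast
          ring
        · cases f with
          | zero => rfl
          | succ f' => simp only [chunkLoopA]; rw [if_neg (by omega)]
  | succ j ih =>
    intro n first r fuel hnf hr0 hrlt hfuel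
    cases fuel with
    | zero => exfalso; split at hfuel <;> omega
    | succ f =>
      simp only [chunkLoopA]
      have hj := Int.natCast_nonneg j
      have hel_big : m * t ≤ n - first := by
        push_cast at hnf
        nlinarith [mul_nonneg hj hmt.le]
      rw [if_pos (by omega)]
      rw [chunkBlocks_full (n - first) t m ht hel_big, min_eq_right hel_big]
      have hrec := ih n (first + m * t) r f
        (by push_cast at hnf ⊢; nlinarith [hnf])
        hr0 hrlt
        (by by_cases hz : r = 0 <;> simp [hz] at hfuel ⊢ <;> omega)
      rw [hrec, List.range_succ_eq_map, List.map_cons, List.map_map, List.cons_append]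
      congr 1
      · congr 1
        push_cast
        ring
      · congr 1
        · apply List.map_congr_left
          intro i _
          simp only [Function.comp_apply]
          congr 1
          push_cast
          ring
        · by_cases hrz : r = 0
          · rw [if_pos hrz, if_pos hrz]
          · rw [if_neg hrz, if_neg hrz]
            congr 1
            congr 1
            push_cast
            ring

-- B's bulk stride range is a mapped List.range.
theorem pyRange_stride (q fs : Int) (hq0 : 0 ≤ q) (hfs : 0 < fs) :
    PySem.List.pyRange 0 (q * fs) fs =
      (List.range q.toNat).map (fun (k : Nat) => fs * (k : Int)) := by
  rw [PySem.List.pyRange_of_pos 0 (q * fs) hfs]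
  by_cases h : (0 : Int) < q * fs
  · rw [if_pos h]
    have hq1 : 1 ≤ q := by nlinarith
    have hdiv : (q * fs - 0 + fs - 1) / fs = q := by
      have he : q * fs - 0 + fs - 1 = (fs - 1) + q * fs := by ring
      rw [he, Int.add_mul_ediv_right _ _ (by omega), Int.ediv_eq_zero_of_lt (by omega) (by omega)]
      omega
    rw [hdiv]
    apply List.map_congr_left
    intro k _
    omega
  · rw [if_neg h]
    have hq : q = 0 := by nlinarith
    subst hq
    simp

-- ===== VERDICT (by name: the statement is the Claim_ definition above) =====
theorem chunk_iterator_spec : Claim_equal_chunk_iterator := by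
  intro n t m _hdom hpre
  simp only [Spec_chunk_iterator, chunk_iterator, chunk_iterator_alt]
  by_cases hn : n ≤ 0
  · rw [if_pos hn]
    have h0 : n.toNat = 0 := by omega
    rw [h0]
    rfl
  · rw [if_neg hn]
    obtain ht | ⟨ht, hm⟩ := hpre
    · omega
    have hmt : 0 < m * t := mul_pos hm ht
    have hfd := PySem.Int.floordiv_mul_add_mod n (m * t)
    obtain ⟨hr0, hrlt⟩ := mod_bounds n (m * t) hmt
    set q := PySem.Int.floordiv n (m * t) with hq
    set r := PySem.Int.mod n (m * t) with hr
    have hq0 : 0 ≤ q := by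
      rw [hq, PySem.Int.floordiv_eq_ediv_of_pos hmt]
      exact Int.ediv_nonneg (by omega) (by omega)
    have hqn : q ≤ q * (m * t) := le_mul_of_one_le_right hq0 (by omega)
    have hrem : n - q * (m * t) = r := by omega
    have hmain := chunkLoopA_eq t m ht hm q.toNat n 0 r n.toNat
      (by rw [Int.toNat_of_nonneg hq0]; omega) hr0 hrlt
      (by by_cases hz : r = 0 <;> simp [hz] <;> omega)
    rw [hmain, hrem]
    rw [pyRange_stride q (m * t) hq0 hmt, List.map_map]
    by_cases hrz : r = 0
    · rw [if_pos hrz, if_neg (by simp [hrz]), List.append_nil]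
      apply List.map_congr_left
      intro i _
      simp only [Function.comp_apply]
      congr 1
      ring
    · rw [if_neg hrz, if_pos hrz]
      congr 1
      · apply List.map_congr_left
        intro i _
        simp only [Function.comp_apply]
        congr 1
        ring
      · congr 1
        congr 1
        rw [Int.toNat_of_nonneg hq0]
        ring
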